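-- pv_equiv track=rewrite | github.com/Gelvanello44/AI_Job_Chommie | services/job-scraper/src/scrapers/government_scraper.py | _detect_job_level_from_title
-- ===== SOURCE A (Python) =====
-- def _detect_job_level_from_title(title: str) -> str:
--     """Detect job level from government job title."""
--     title_lower = title.lower()
--
--     if any(term in title_lower for term in ["director general", "deputy director general", "chief"]):
--         return "c_suite"
--     elif any(term in title_lower for term in ["director", "head of"]):
--         return "director"
--     elif any(term in title_lower for term in ["manager", "supervisor"]):
--         return "manager"
--     elif any(term in title_lower for term in ["senior", "specialist", "principal"]):
--         return "senior"
--     elif any(term in title_lower for term in ["junior", "assistant", "intern", "graduate"]):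
--         return "entry"
--     elif any(term in title_lower for term in ["officer", "administrator", "analyst"]):
--         return "mid"
--
--     return "mid"
-- ===== SOURCE B (Python) =====
-- _KEYWORD_LEVEL = {
--     "director general": "c_suite",
--     "deputy director general": "c_suite",
--     "chief": "c_suite",
--     "director": "director",
--     "head of": "director",
--     "manager": "manager",
--     "supervisor": "manager",
--     "senior": "senior",
--     "specialist": "senior",
--     "principal": "senior",
--     "junior": "entry",
--     "assistant": "entry",
--     "intern": "entry",
--     "graduate": "entry",
--     "officer": "mid",
--     "administrator": "mid",
--     "analyst": "mid",
-- }
--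
-- _RANK = {"c_suite": 0, "director": 1, "manager": 2, "senior": 3, "entry": 4, "mid": 5}
--
--
-- def _detect_job_level_from_title(title: str) -> str:
--     t = title.lower()
--     matched = {level for kw, level in _KEYWORD_LEVEL.items() if kw in t}
--     if not matched:
--         return "mid"
--     return min(matched, key=_RANK.__getitem__)
-- ===== Notes on version B (the rewrite author's own statement) =====
-- stated objective: alternative
-- what changed: Instead of A's priority if-elif ladder with early return, B builds a flat keyword->level map, collects the set of ALL levels whose keyword occurs in the lowered title in one comprehension, and then selects the highest-priority one via min with a rank key (default 'mid' when nothing matches).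
import Mathlib
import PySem

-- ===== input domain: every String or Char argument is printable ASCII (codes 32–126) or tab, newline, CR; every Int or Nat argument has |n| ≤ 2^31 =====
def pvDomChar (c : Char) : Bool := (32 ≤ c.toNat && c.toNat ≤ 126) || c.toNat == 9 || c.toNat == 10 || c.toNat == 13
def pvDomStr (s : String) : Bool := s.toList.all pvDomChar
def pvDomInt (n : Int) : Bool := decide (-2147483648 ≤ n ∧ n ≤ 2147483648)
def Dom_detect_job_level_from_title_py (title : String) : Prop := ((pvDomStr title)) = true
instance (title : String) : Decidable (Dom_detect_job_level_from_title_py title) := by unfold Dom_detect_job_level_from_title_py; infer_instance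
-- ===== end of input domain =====

-- B replaces A's priority if-elif ladder by a different decomposition: one pass collects the
-- SET of all levels whose keyword occurs in the title, then min-by-rank picks the
-- highest-priority one; objective: alternative.

-- ===== PORT A =====
def detect_job_level_from_title_py (title : String) : String :=
  let title_lower := PySem.Str.lower title
  if ["director general", "deputy director general", "chief"].any
      (fun term => PySem.Str.isIn term title_lower) then "c_suite"
  else if ["director", "head of"].any (fun term => PySem.Str.isIn term title_lower) then "director"
  else if ["manager", "supervisor"].any (fun term => PySem.Str.isIn term title_lower) then "manager"
  else if ["senior", "specialist", "principal"].any
      (fun term => PySem.Str.isIn term title_lower) then "senior"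
  else if ["junior", "assistant", "intern", "graduate"].any
      (fun term => PySem.Str.isIn term title_lower) then "entry"
  else if ["officer", "administrator", "analyst"].any
      (fun term => PySem.Str.isIn term title_lower) then "mid"
  else "mid"

-- ===== PORT B =====
def pvKeywordLevel : List (String × String) :=
  [("director general", "c_suite"), ("deputy director general", "c_suite"), ("chief", "c_suite"),
   ("director", "director"), ("head of", "director"),
   ("manager", "manager"), ("supervisor", "manager"),
   ("senior", "senior"), ("specialist", "senior"), ("principal", "senior"),
   ("junior", "entry"), ("assistant", "entry"), ("intern", "entry"), ("graduate", "entry"),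
   ("officer", "mid"), ("administrator", "mid"), ("analyst", "mid")]

def pvRank : PySem.Dict String Int :=
  PySem.Dict.ofList [("c_suite", 0), ("director", 1), ("manager", 2), ("senior", 3), ("entry", 4), ("mid", 5)]

def detect_job_level_from_title_py_alt (title : String) : String :=
  let t := PySem.Str.lower title
  let matched : PySem.Set String :=
    PySem.Set.ofList ((pvKeywordLevel.filter (fun kv => PySem.Str.isIn kv.1 t)).map Prod.snd)
  if matched = [] then "mid"
  else (PySem.List.min? matched (fun level => PySem.Dict.getD pvRank level 0)).getD "mid"

-- ===== PRECONDITION & SPEC =====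
def Spec_detect_job_level_from_title_py (title : String) (out : String) : Prop := out = detect_job_level_from_title_py_alt title
instance (title : String) (out : String) : Decidable (Spec_detect_job_level_from_title_py title out) := by unfold Spec_detect_job_level_from_title_py; infer_instance

-- ===== CLAIM (what is proved, stated in full; the proofs are below) =====
def Claim_equal_detect_job_level_from_title_py : Prop := ∀ (title : String), Dom_detect_job_level_from_title_py title → Spec_detect_job_level_from_title_py title (detect_job_level_from_title_py title)

-- ===== LEMMAS AND PROOFS =====

-- B's matched set, as a proof-side abbreviation (definitionally the `matched` of the B port)
def pvMatched (t : String) : List String :=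
  PySem.Set.ofList ((pvKeywordLevel.filter (fun kv => PySem.Str.isIn kv.1 t)).map Prod.snd)

lemma mem_pvMatched (t y : String) : y ∈ pvMatched t ↔
    PySem.Str.isIn "director general" t = true ∧ "c_suite" = y ∨
    PySem.Str.isIn "deputy director general" t = true ∧ "c_suite" = y ∨
    PySem.Str.isIn "chief" t = true ∧ "c_suite" = y ∨
    PySem.Str.isIn "director" t = true ∧ "director" = y ∨
    PySem.Str.isIn "head of" t = true ∧ "director" = y ∨
    PySem.Str.isIn "manager" t = true ∧ "manager" = y ∨
    PySem.Str.isIn "supervisor" t = true ∧ "manager" = y ∨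
    PySem.Str.isIn "senior" t = true ∧ "senior" = y ∨
    PySem.Str.isIn "specialist" t = true ∧ "senior" = y ∨
    PySem.Str.isIn "principal" t = true ∧ "senior" = y ∨
    PySem.Str.isIn "junior" t = true ∧ "entry" = y ∨
    PySem.Str.isIn "assistant" t = true ∧ "entry" = y ∨
    PySem.Str.isIn "intern" t = true ∧ "entry" = y ∨
    PySem.Str.isIn "graduate" t = true ∧ "entry" = y ∨
    PySem.Str.isIn "officer" t = true ∧ "mid" = y ∨
    PySem.Str.isIn "administrator" t = true ∧ "mid" = y ∨
    PySem.Str.isIn "analyst" t = true ∧ "mid" = y := by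
  simp only [pvMatched, PySem.Set.mem_ofList, List.mem_map, List.mem_filter, pvKeywordLevel,
    List.mem_cons, List.not_mem_nil, or_false, or_and_right, and_assoc, exists_or, exists_eq_left]

-- every member of the matched set is one of the six level names
lemma pvMatched_names (t : String) : ∀ y ∈ pvMatched t,
    y = "c_suite" ∨ y = "director" ∨ y = "manager" ∨ y = "senior" ∨ y = "entry" ∨ y = "mid" := by
  intro y hy
  rw [mem_pvMatched] at hy
  rcases hy with ⟨_, rfl⟩|⟨_, rfl⟩|⟨_, rfl⟩|⟨_, rfl⟩|⟨_, rfl⟩|⟨_, rfl⟩|⟨_, rfl⟩|⟨_, rfl⟩|⟨_, rfl⟩|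
    ⟨_, rfl⟩|⟨_, rfl⟩|⟨_, rfl⟩|⟨_, rfl⟩|⟨_, rfl⟩|⟨_, rfl⟩|⟨_, rfl⟩|⟨_, rfl⟩ <;> tauto

-- min-by-rank over a list of level names is the unique member of minimal rank
lemma pv_min_eq (M : List String) (l : String)
    (hsub : ∀ y ∈ M, y = "c_suite" ∨ y = "director" ∨ y = "manager" ∨ y = "senior" ∨
      y = "entry" ∨ y = "mid")
    (hl : l ∈ M)
    (hmin : ∀ y ∈ M, PySem.Dict.getD pvRank l 0 ≤ PySem.Dict.getD pvRank y 0) :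
    PySem.List.min? M (fun level => PySem.Dict.getD pvRank level 0) = some l := by
  cases hm : PySem.List.min? M (fun level => PySem.Dict.getD pvRank level 0) with
  | none => rw [PySem.List.min?_eq_none_iff] at hm; subst hm; cases hl
  | some m =>
    have hmm := PySem.List.min?_mem hm
    have hle := PySem.List.min?_isMin hm l hl
    have hge := hmin m hmm
    have heq : PySem.Dict.getD pvRank m 0 = PySem.Dict.getD pvRank l 0 := le_antisymm hle hge
    rcases hsub m hmm with rfl|rfl|rfl|rfl|rfl|rfl <;> rcases hsub l hl with rfl|rfl|rfl|rfl|rfl|rfl <;>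
      first | rfl | (exfalso; revert heq; decide)

-- the two ports agree, stated over the already-lowered title
set_option maxHeartbeats 3200000 in
lemma pv_main (t : String) :
    (if ["director general", "deputy director general", "chief"].any
        (fun term => PySem.Str.isIn term t) then "c_suite"
     else if ["director", "head of"].any (fun term => PySem.Str.isIn term t) then "director"
     else if ["manager", "supervisor"].any (fun term => PySem.Str.isIn term t) then "manager"
     else if ["senior", "specialist", "principal"].any
        (fun term => PySem.Str.isIn term t) then "senior"
     else if ["junior", "assistant", "intern", "graduate"].any
        (fun term => PySem.Str.isIn term t) then "entry"
     else if ["officer", "administrator", "analyst"].any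
        (fun term => PySem.Str.isIn term t) then "mid"
     else "mid") =
    (if pvMatched t = [] then "mid"
     else (PySem.List.min? (pvMatched t)
        (fun level => PySem.Dict.getD pvRank level 0)).getD "mid") := by
  simp only [List.any_cons, List.any_nil, Bool.or_eq_true, Bool.false_eq_true, or_false]
  by_cases h1 : PySem.Str.isIn "director general" t = true ∨ PySem.Str.isIn "deputy director general" t = true ∨ PySem.Str.isIn "chief" t = true
  · rw [if_pos h1]
    have hm : "c_suite" ∈ pvMatched t := by
      rcases h1 with h|h|h
      · exact (mem_pvMatched t "c_suite").2 (Or.inl (⟨h, rfl⟩))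
      · exact (mem_pvMatched t "c_suite").2 (Or.inr (Or.inl (⟨h, rfl⟩)))
      · exact (mem_pvMatched t "c_suite").2 (Or.inr (Or.inr (Or.inl (⟨h, rfl⟩))))
    rw [if_neg (List.ne_nil_of_mem hm),
      pv_min_eq _ _ (pvMatched_names t) hm (fun y hy => by
        rcases (mem_pvMatched t y).1 hy with ⟨hin, rfl⟩|⟨hin, rfl⟩|⟨hin, rfl⟩|⟨hin, rfl⟩|⟨hin, rfl⟩|⟨hin, rfl⟩|⟨hin, rfl⟩|⟨hin, rfl⟩|⟨hin, rfl⟩|⟨hin, rfl⟩|⟨hin, rfl⟩|⟨hin, rfl⟩|⟨hin, rfl⟩|⟨hin, rfl⟩|⟨hin, rfl⟩|⟨hin, rfl⟩|⟨hin, rfl⟩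
        · decide
        · decide
        · decide
        · decide
        · decide
        · decide
        · decide
        · decide
        · decide
        · decide
        · decide
        · decide
        · decide
        · decide
        · decide
        · decide
        · decide
        )]
    rfl
  · rw [if_neg h1]
    push Not at h1
    by_cases h2 : PySem.Str.isIn "director" t = true ∨ PySem.Str.isIn "head of" t = true
    · rw [if_pos h2]
      have hm : "director" ∈ pvMatched t := by
        rcases h2 with h|h
        · exact (mem_pvMatched t "director").2 (Or.inr (Or.inr (Or.inr (Or.inl (⟨h, rfl⟩)))))
        · exact (mem_pvMatched t "director").2 (Or.inr (Or.inr (Or.inr (Or.inr (Or.inl (⟨h, rfl⟩))))))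
      rw [if_neg (List.ne_nil_of_mem hm),
        pv_min_eq _ _ (pvMatched_names t) hm (fun y hy => by
          rcases (mem_pvMatched t y).1 hy with ⟨hin, rfl⟩|⟨hin, rfl⟩|⟨hin, rfl⟩|⟨hin, rfl⟩|⟨hin, rfl⟩|⟨hin, rfl⟩|⟨hin, rfl⟩|⟨hin, rfl⟩|⟨hin, rfl⟩|⟨hin, rfl⟩|⟨hin, rfl⟩|⟨hin, rfl⟩|⟨hin, rfl⟩|⟨hin, rfl⟩|⟨hin, rfl⟩|⟨hin, rfl⟩|⟨hin, rfl⟩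
          · exact absurd hin h1.1
          · exact absurd hin h1.2.1
          · exact absurd hin h1.2.2
          · decide
          · decide
          · decide
          · decide
          · decide
          · decide
          · decide
          · decide
          · decide
          · decide
          · decide
          · decide
          · decide
          · decide
          )]
      rfl
    · rw [if_neg h2]
      push Not at h2
      by_cases h3 : PySem.Str.isIn "manager" t = true ∨ PySem.Str.isIn "supervisor" t = true
      · rw [if_pos h3]
        have hm : "manager" ∈ pvMatched t := by
          rcases h3 with h|h
          · exact (mem_pvMatched t "manager").2 (Or.inr (Or.inr (Or.inr (Or.inr (Or.inr (Or.inl (⟨h, rfl⟩)))))))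
          · exact (mem_pvMatched t "manager").2 (Or.inr (Or.inr (Or.inr (Or.inr (Or.inr (Or.inr (Or.inl (⟨h, rfl⟩))))))))
        rw [if_neg (List.ne_nil_of_mem hm),
          pv_min_eq _ _ (pvMatched_names t) hm (fun y hy => by
            rcases (mem_pvMatched t y).1 hy with ⟨hin, rfl⟩|⟨hin, rfl⟩|⟨hin, rfl⟩|⟨hin, rfl⟩|⟨hin, rfl⟩|⟨hin, rfl⟩|⟨hin, rfl⟩|⟨hin, rfl⟩|⟨hin, rfl⟩|⟨hin, rfl⟩|⟨hin, rfl⟩|⟨hin, rfl⟩|⟨hin, rfl⟩|⟨hin, rfl⟩|⟨hin, rfl⟩|⟨hin, rfl⟩|⟨hin, rfl⟩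
            · exact absurd hin h1.1
            · exact absurd hin h1.2.1
            · exact absurd hin h1.2.2
            · exact absurd hin h2.1
            · exact absurd hin h2.2
            · decide
            · decide
            · decide
            · decide
            · decide
            · decide
            · decide
            · decide
            · decide
            · decide
            · decide
            · decide
            )]
        rfl
      · rw [if_neg h3]
        push Not at h3
        by_cases h4 : PySem.Str.isIn "senior" t = true ∨ PySem.Str.isIn "specialist" t = true ∨ PySem.Str.isIn "principal" t = true
        · rw [if_pos h4]
          have hm : "senior" ∈ pvMatched t := by
            rcases h4 with h|h|h
            · exact (mem_pvMatched t "senior").2 (Or.inr (Or.inr (Or.inr (Or.inr (Or.inr (Or.inr (Or.inr (Or.inl (⟨h, rfl⟩)))))))))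
            · exact (mem_pvMatched t "senior").2 (Or.inr (Or.inr (Or.inr (Or.inr (Or.inr (Or.inr (Or.inr (Or.inr (Or.inl (⟨h, rfl⟩))))))))))
            · exact (mem_pvMatched t "senior").2 (Or.inr (Or.inr (Or.inr (Or.inr (Or.inr (Or.inr (Or.inr (Or.inr (Or.inr (Or.inl (⟨h, rfl⟩)))))))))))
          rw [if_neg (List.ne_nil_of_mem hm),
            pv_min_eq _ _ (pvMatched_names t) hm (fun y hy => by
              rcases (mem_pvMatched t y).1 hy with ⟨hin, rfl⟩|⟨hin, rfl⟩|⟨hin, rfl⟩|⟨hin, rfl⟩|⟨hin, rfl⟩|⟨hin, rfl⟩|⟨hin, rfl⟩|⟨hin, rfl⟩|⟨hin, rfl⟩|⟨hin, rfl⟩|⟨hin, rfl⟩|⟨hin, rfl⟩|⟨hin, rfl⟩|⟨hin, rfl⟩|⟨hin, rfl⟩|⟨hin, rfl⟩|⟨hin, rfl⟩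
              · exact absurd hin h1.1
              · exact absurd hin h1.2.1
              · exact absurd hin h1.2.2
              · exact absurd hin h2.1
              · exact absurd hin h2.2
              · exact absurd hin h3.1
              · exact absurd hin h3.2
              · decide
              · decide
              · decide
              · decide
              · decide
              · decide
              · decide
              · decide
              · decide
              · decide
              )]
          rfl
        · rw [if_neg h4]
          push Not at h4
          by_cases h5 : PySem.Str.isIn "junior" t = true ∨ PySem.Str.isIn "assistant" t = true ∨ PySem.Str.isIn "intern" t = true ∨ PySem.Str.isIn "graduate" t = true
          · rw [if_pos h5]
            have hm : "entry" ∈ pvMatched t := by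
              rcases h5 with h|h|h|h
              · exact (mem_pvMatched t "entry").2 (Or.inr (Or.inr (Or.inr (Or.inr (Or.inr (Or.inr (Or.inr (Or.inr (Or.inr (Or.inr (Or.inl (⟨h, rfl⟩))))))))))))
              · exact (mem_pvMatched t "entry").2 (Or.inr (Or.inr (Or.inr (Or.inr (Or.inr (Or.inr (Or.inr (Or.inr (Or.inr (Or.inr (Or.inr (Or.inl (⟨h, rfl⟩)))))))))))))
              · exact (mem_pvMatched t "entry").2 (Or.inr (Or.inr (Or.inr (Or.inr (Or.inr (Or.inr (Or.inr (Or.inr (Or.inr (Or.inr (Or.inr (Or.inr (Or.inl (⟨h, rfl⟩))))))))))))))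
              · exact (mem_pvMatched t "entry").2 (Or.inr (Or.inr (Or.inr (Or.inr (Or.inr (Or.inr (Or.inr (Or.inr (Or.inr (Or.inr (Or.inr (Or.inr (Or.inr (Or.inl (⟨h, rfl⟩)))))))))))))))
            rw [if_neg (List.ne_nil_of_mem hm),
              pv_min_eq _ _ (pvMatched_names t) hm (fun y hy => by
                rcases (mem_pvMatched t y).1 hy with ⟨hin, rfl⟩|⟨hin, rfl⟩|⟨hin, rfl⟩|⟨hin, rfl⟩|⟨hin, rfl⟩|⟨hin, rfl⟩|⟨hin, rfl⟩|⟨hin, rfl⟩|⟨hin, rfl⟩|⟨hin, rfl⟩|⟨hin, rfl⟩|⟨hin, rfl⟩|⟨hin, rfl⟩|⟨hin, rfl⟩|⟨hin, rfl⟩|⟨hin, rfl⟩|⟨hin, rfl⟩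
                · exact absurd hin h1.1
                · exact absurd hin h1.2.1
                · exact absurd hin h1.2.2
                · exact absurd hin h2.1
                · exact absurd hin h2.2
                · exact absurd hin h3.1
                · exact absurd hin h3.2
                · exact absurd hin h4.1
                · exact absurd hin h4.2.1
                · exact absurd hin h4.2.2
                · decide
                · decide
                · decide
                · decide
                · decide
                · decide
                · decide
                )]
            rfl
          · rw [if_neg h5]
            push Not at h5
            by_cases h6 : PySem.Str.isIn "officer" t = true ∨ PySem.Str.isIn "administrator" t = true ∨ PySem.Str.isIn "analyst" t = true
            · rw [if_pos h6]
              have hm : "mid" ∈ pvMatched t := by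
                rcases h6 with h|h|h
                · exact (mem_pvMatched t "mid").2 (Or.inr (Or.inr (Or.inr (Or.inr (Or.inr (Or.inr (Or.inr (Or.inr (Or.inr (Or.inr (Or.inr (Or.inr (Or.inr (Or.inr (Or.inl (⟨h, rfl⟩))))))))))))))))
                · exact (mem_pvMatched t "mid").2 (Or.inr (Or.inr (Or.inr (Or.inr (Or.inr (Or.inr (Or.inr (Or.inr (Or.inr (Or.inr (Or.inr (Or.inr (Or.inr (Or.inr (Or.inr (Or.inl (⟨h, rfl⟩)))))))))))))))))
                · exact (mem_pvMatched t "mid").2 (Or.inr (Or.inr (Or.inr (Or.inr (Or.inr (Or.inr (Or.inr (Or.inr (Or.inr (Or.inr (Or.inr (Or.inr (Or.inr (Or.inr (Or.inr (Or.inr (⟨h, rfl⟩)))))))))))))))))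
              rw [if_neg (List.ne_nil_of_mem hm),
                pv_min_eq _ _ (pvMatched_names t) hm (fun y hy => by
                  rcases (mem_pvMatched t y).1 hy with ⟨hin, rfl⟩|⟨hin, rfl⟩|⟨hin, rfl⟩|⟨hin, rfl⟩|⟨hin, rfl⟩|⟨hin, rfl⟩|⟨hin, rfl⟩|⟨hin, rfl⟩|⟨hin, rfl⟩|⟨hin, rfl⟩|⟨hin, rfl⟩|⟨hin, rfl⟩|⟨hin, rfl⟩|⟨hin, rfl⟩|⟨hin, rfl⟩|⟨hin, rfl⟩|⟨hin, rfl⟩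
                  · exact absurd hin h1.1
                  · exact absurd hin h1.2.1
                  · exact absurd hin h1.2.2
                  · exact absurd hin h2.1
                  · exact absurd hin h2.2
                  · exact absurd hin h3.1
                  · exact absurd hin h3.2
                  · exact absurd hin h4.1
                  · exact absurd hin h4.2.1
                  · exact absurd hin h4.2.2
                  · exact absurd hin h5.1
                  · exact absurd hin h5.2.1
                  · exact absurd hin h5.2.2.1
                  · exact absurd hin h5.2.2.2
                  · decide
                  · decide
                  · decide
                  )]
              rfl
            · rw [if_neg h6]
              push Not at h6
              have hE : pvMatched t = [] := by
                rw [List.eq_nil_iff_forall_not_mem]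
                intro y hy
                rcases (mem_pvMatched t y).1 hy with ⟨hin, rfl⟩|⟨hin, rfl⟩|⟨hin, rfl⟩|⟨hin, rfl⟩|⟨hin, rfl⟩|⟨hin, rfl⟩|⟨hin, rfl⟩|⟨hin, rfl⟩|⟨hin, rfl⟩|⟨hin, rfl⟩|⟨hin, rfl⟩|⟨hin, rfl⟩|⟨hin, rfl⟩|⟨hin, rfl⟩|⟨hin, rfl⟩|⟨hin, rfl⟩|⟨hin, rfl⟩
                · exact absurd hin h1.1
                · exact absurd hin h1.2.1
                · exact absurd hin h1.2.2
                · exact absurd hin h2.1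
                · exact absurd hin h2.2
                · exact absurd hin h3.1
                · exact absurd hin h3.2
                · exact absurd hin h4.1
                · exact absurd hin h4.2.1
                · exact absurd hin h4.2.2
                · exact absurd hin h5.1
                · exact absurd hin h5.2.1
                · exact absurd hin h5.2.2.1
                · exact absurd hin h5.2.2.2
                · exact absurd hin h6.1
                · exact absurd hin h6.2.1
                · exact absurd hin h6.2.2
              rw [if_pos hE]

-- ===== VERDICT (by name: the statement is the Claim_ definition above) =====
theorem detect_job_level_from_title_py_spec : Claim_equal_detect_job_level_from_title_py := by
  intro title _
  exact pv_main (PySem.Str.lower title)
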